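-- pv_equiv track=rewrite | github.com/gh720/auto_lines_python | board/board_graph.py | get_cycle_bounds
-- ===== SOURCE A (Python) =====
-- def get_cycle_bounds(cycle):
--     i_min=0
--     minx,miny=cycle[0]
--     maxx,maxy=cycle[0]
--     miny_for_minx=None
--     for i in range(len(cycle)):
--         x,y = cycle[i]
--         if x< minx:
--             minx=x
--             miny_for_minx=y
--             i_min=i
--         elif x==minx:
--             if miny_for_minx==None or y<miny_for_minx:
--                 miny_for_minx=y
--                 i_min=i
--         miny=min(miny,y)
--         maxx=max(maxx,x)
--         maxy=max(maxy,y)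
--     return i_min,minx,miny,maxx,maxy
-- ===== SOURCE B (Python) =====
-- def get_cycle_bounds(cycle):
--     # Bounding box as four independent built-in reductions, plus a key-based
--     # argmin for the lexicographically smallest corner (first occurrence).
--     i_min = min(range(len(cycle)), key=lambda i: cycle[i])
--     minx = min(x for x, _ in cycle)
--     miny = min(y for _, y in cycle)
--     maxx = max(x for x, _ in cycle)
--     maxy = max(y for _, y in cycle)
--     return i_min, minx, miny, maxx, maxy
-- ===== Notes on version B (the rewrite author's own statement) =====
-- stated objective: simpler
-- what changed: Replaces A's single stateful loop (six mutable variables with an optional sentinel and branch-ordered updates) by four independent built-in min/max reductions plus a key-based argmin over indices using Python tuple comparison.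
-- outside the precondition, e.g. on get_cycle_bounds([]): A raises IndexError, B raises ValueError
import Mathlib
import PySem

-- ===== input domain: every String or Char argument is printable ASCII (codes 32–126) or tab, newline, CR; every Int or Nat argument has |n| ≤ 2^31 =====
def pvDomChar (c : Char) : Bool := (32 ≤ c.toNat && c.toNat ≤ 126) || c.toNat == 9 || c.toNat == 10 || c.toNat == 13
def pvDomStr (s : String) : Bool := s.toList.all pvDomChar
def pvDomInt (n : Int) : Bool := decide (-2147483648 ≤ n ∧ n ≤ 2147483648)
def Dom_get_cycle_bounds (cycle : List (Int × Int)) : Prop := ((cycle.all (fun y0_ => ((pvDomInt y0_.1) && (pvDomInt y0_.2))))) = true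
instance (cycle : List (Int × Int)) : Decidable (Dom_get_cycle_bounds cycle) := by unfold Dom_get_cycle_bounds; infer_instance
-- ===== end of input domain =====

-- B is a different decomposition: four independent min/max reductions and a
-- key-based first-occurrence argmin, instead of A's single stateful loop.
-- Equivalence of the RETURN value is proved on nonempty input (both raise on []).

-- ===== PORT A =====
-- state of A's loop: (i_min, minx, miny, maxx, maxy, miny_for_minx)
structure PvAState where
  i_min : Int
  minx : Int
  miny : Int
  maxx : Int
  maxy : Int
  mfm : Option Int
deriving Repr, DecidableEq

-- one iteration of A's 'for i in range(len(cycle)): x,y = cycle[i]; ...'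
def pvAStep (s : PvAState) (ip : Int × Int × Int) : PvAState :=
  let i := ip.1
  let x := ip.2.1
  let y := ip.2.2
  let s1 : PvAState :=
    if x < s.minx then { s with minx := x, mfm := some y, i_min := i }
    else if x = s.minx then
      (if (match s.mfm with
           | none => true
           | some m => decide (y < m)) then { s with mfm := some y, i_min := i } else s)
    else s
  { s1 with miny := min s1.miny y, maxx := max s1.maxx x, maxy := max s1.maxy y }

-- 'for i in range(len(cycle)): x,y = cycle[i]' ported as a fold over enumerate cycle
def get_cycle_bounds (cycle : List (Int × Int)) : Int × Int × Int × Int × Int :=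
  match cycle with
  | [] => (0, 0, 0, 0, 0)  -- unreachable under Pre_: Python raises IndexError on cycle[0]
  | c0 :: _ =>
    let init : PvAState := ⟨0, c0.1, c0.2, c0.1, c0.2, none⟩
    let s := (PySem.List.enumerate cycle 0).foldl pvAStep init
    (s.i_min, s.minx, s.miny, s.maxx, s.maxy)

-- ===== PORT B =====
-- Python 'min' over a nonempty list: fold of binary min from the head
def pvMinList (h : Int) (t : List Int) : Int := t.foldl min h
def pvMaxList (h : Int) (t : List Int) : Int := t.foldl max h

-- one comparison step of 'min(range(len(cycle)), key=lambda i: cycle[i])':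
-- keep the current best unless the new key is strictly lexicographically smaller
def pvArgminStep (b : Int × Int × Int) (ip : Int × Int × Int) : Int × Int × Int :=
  if ip.2.1 < b.2.1 ∨ (ip.2.1 = b.2.1 ∧ ip.2.2 < b.2.2) then ip else b

def get_cycle_bounds_alt (cycle : List (Int × Int)) : Int × Int × Int × Int × Int :=
  match cycle with
  | [] => (0, 0, 0, 0, 0)  -- unreachable under Pre_: Python min(range(0),...) raises ValueError
  | c0 :: rest =>
    let i_min := ((PySem.List.enumerate rest 1).foldl pvArgminStep (0, c0.1, c0.2)).1
    let minx := pvMinList c0.1 (rest.map (·.1))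
    let miny := pvMinList c0.2 (rest.map (·.2))
    let maxx := pvMaxList c0.1 (rest.map (·.1))
    let maxy := pvMaxList c0.2 (rest.map (·.2))
    (i_min, minx, miny, maxx, maxy)

-- ===== PRECONDITION & SPEC =====
-- Pre_ excludes only the empty list, on which A raises IndexError (and B raises ValueError).
def Pre_get_cycle_bounds (cycle : List (Int × Int)) : Prop := cycle ≠ []
instance (cycle : List (Int × Int)) : Decidable (Pre_get_cycle_bounds cycle) := by unfold Pre_get_cycle_bounds; infer_instance
def pvWitness_get_cycle_bounds : (List (Int × Int)) := [(2, 5), (1, 7), (1, 3)]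

def Spec_get_cycle_bounds (cycle : List (Int × Int)) (out : Int × Int × Int × Int × Int) : Prop := out = get_cycle_bounds_alt cycle
instance (cycle : List (Int × Int)) (out : Int × Int × Int × Int × Int) : Decidable (Spec_get_cycle_bounds cycle out) := by unfold Spec_get_cycle_bounds; infer_instance

-- ===== CLAIM (what is proved, stated in full; the proofs are below) =====
def Claim_equal_get_cycle_bounds : Prop := ∀ (cycle : List (Int × Int)), Dom_get_cycle_bounds cycle → Pre_get_cycle_bounds cycle → Spec_get_cycle_bounds cycle (get_cycle_bounds cycle)

-- ===== LEMMAS AND PROOFS =====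

-- Decomposition of A's loop: once miny_for_minx is 'some m', A's fold splits into
-- B's argmin fold (components i_min, minx, mfm) and three independent min/max folds.
theorem pvAStep_decomp (l : List (Int × Int)) :
    ∀ (k i mx m my Mx My : Int),
    (PySem.List.enumerate l k).foldl pvAStep ⟨i, mx, my, Mx, My, some m⟩ =
      (let b := (PySem.List.enumerate l k).foldl pvArgminStep (i, mx, m)
       ⟨b.1, b.2.1, pvMinList my (l.map (·.2)), pvMaxList Mx (l.map (·.1)),
        pvMaxList My (l.map (·.2)), some b.2.2⟩) := by
  induction l with
  | nil => intro k i mx m my Mx My; simp [PySem.List.enumerate_nil, pvMinList, pvMaxList]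
  | cons p t ih =>
    intro k i mx m my Mx My
    rcases p with ⟨x, y⟩
    rw [PySem.List.enumerate_cons]
    simp only [List.foldl_cons]
    have hstep : pvAStep ⟨i, mx, my, Mx, My, some m⟩ (k, x, y) =
        (let b := pvArgminStep (i, mx, m) (k, x, y)
         ⟨b.1, b.2.1, min my y, max Mx x, max My y, some b.2.2⟩) := by
      simp only [pvAStep, pvArgminStep]
      split_ifs with h1 h2 h3 h4 h5 <;>
        simp_all <;> omega
    rw [hstep]
    simp only [List.map_cons]
    rw [ih]
    simp [pvMinList, pvMaxList]

-- the x-component of the argmin fold is the running minimum of the x's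
theorem pvArgmin_fst_min (l : List (Int × Int)) :
    ∀ (k i mx m : Int),
    ((PySem.List.enumerate l k).foldl pvArgminStep (i, mx, m)).2.1 =
      pvMinList mx (l.map (·.1)) := by
  induction l with
  | nil => intro k i mx m; simp [PySem.List.enumerate_nil, pvMinList]
  | cons p t ih =>
    intro k i mx m
    rcases p with ⟨x, y⟩
    rw [PySem.List.enumerate_cons]
    simp only [List.foldl_cons, List.map_cons]
    have : pvMinList mx (x :: t.map (·.1)) =
        pvMinList (if x < mx ∨ (x = mx ∧ y < m) then ((k, x, y) : Int × Int × Int).2.1 else mx)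
          (t.map (·.1)) := by
      simp only [pvMinList, List.foldl_cons]
      congr 1
      split_ifs <;> simp <;> omega
    rw [this, pvArgminStep]
    split_ifs with h
    · rw [ih]
    · rw [ih]

theorem pvArgminStep_first (s : PvAState) (c : Int × Int) (h : s = ⟨0, c.1, c.2, c.1, c.2, none⟩) :
    pvAStep s (0, c.1, c.2) = ⟨0, c.1, c.2, c.1, c.2, some c.2⟩ := by
  subst h
  simp [pvAStep]

-- ===== VERDICT (by name: the statement is the Claim_ definition above) =====
theorem get_cycle_bounds_spec : Claim_equal_get_cycle_bounds := by
  intro cycle _ hpre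
  unfold Spec_get_cycle_bounds
  match cycle with
  | [] => exact absurd rfl hpre
  | c0 :: rest =>
    simp only [get_cycle_bounds, get_cycle_bounds_alt]
    rw [PySem.List.enumerate_cons]
    simp only [List.foldl_cons]
    rw [pvArgminStep_first _ c0 rfl]
    rw [pvAStep_decomp]
    simp only []
    rw [pvArgmin_fst_min]
    norm_num
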